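-- pv_equiv track=rewrite | github.com/fsdafdsw/xakkep | polymarket_edge_bot_realprice/meta_dataset.py | _count
-- ===== SOURCE A (Python) =====
-- from collections import defaultdict
--
-- def _count(rows, field):
--     counts = defaultdict(int)
--     for row in rows:
--         value = row.get(field)
--         if value is None:
--             value = "null"
--         counts[str(value)] += 1
--     return dict(sorted(counts.items()))
-- ===== SOURCE B (Python) =====
-- from itertools import groupby
--
--
-- def _count(rows, field):
--     vals = sorted(
--         "null" if row.get(field) is None else str(row.get(field))
--         for row in rows
--     )
--     return {k: sum(1 for _ in g) for k, g in groupby(vals)}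
-- ===== Notes on version B (the rewrite author's own statement) =====
-- stated objective: alternative
-- what changed: Instead of incrementing a defaultdict per row and sorting the items at the end, B maps rows to normalized values, sorts that list of strings, and emits each run's value with its length via itertools.groupby, so keys arrive already sorted and no counter dict is kept.
import Mathlib
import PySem

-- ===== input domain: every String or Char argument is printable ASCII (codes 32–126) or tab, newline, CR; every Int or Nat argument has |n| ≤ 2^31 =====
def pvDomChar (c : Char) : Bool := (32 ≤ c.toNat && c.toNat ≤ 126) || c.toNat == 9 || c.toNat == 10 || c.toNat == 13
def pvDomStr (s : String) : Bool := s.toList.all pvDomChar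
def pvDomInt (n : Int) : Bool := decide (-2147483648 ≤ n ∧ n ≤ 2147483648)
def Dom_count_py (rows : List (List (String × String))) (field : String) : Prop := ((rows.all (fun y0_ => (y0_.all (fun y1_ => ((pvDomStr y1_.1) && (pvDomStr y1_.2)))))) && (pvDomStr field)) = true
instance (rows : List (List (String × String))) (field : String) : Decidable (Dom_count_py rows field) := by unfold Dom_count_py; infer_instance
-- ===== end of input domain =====

-- B replaces A's per-row counter dict + final item sort by sort-the-normalized-values-
-- then-run-length-group (itertools.groupby); a different decomposition of similar cost.

-- ===== PORT A =====
-- counts[str(value)] += 1 over a defaultdict(int), then dict(sorted(counts.items())).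
-- counts' keys are distinct, so Python's lexicographic tuple sort of the (key, count)
-- pairs never reaches the second component: it is exactly sorting by key.
-- (values are strings here, so str(value) is the value itself)
def count_py (rows : List (List (String × String))) (field : String) : List (String × Int) :=
  let counts : PySem.Dict String Int :=
    rows.foldl (fun d row =>
      let value := ((PySem.Dict.mk row).get? field).getD "null"
      d.modify value 0 (· + 1)) PySem.Dict.empty
  PySem.List.sorted counts.items (fun p => p.1) false

-- ===== PORT B =====
-- itertools.groupby over a sorted list = run-length grouping of consecutive equal values
def groupRuns : List String → List (String × Int)
  | [] => []
  | v :: rest =>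
      (v, 1 + (rest.takeWhile (fun x => x == v)).length) ::
        groupRuns (rest.dropWhile (fun x => x == v))
termination_by l => l.length
decreasing_by
  exact Nat.lt_succ_of_le (List.length_dropWhile_le _ _)

def count_py_alt (rows : List (List (String × String))) (field : String) : List (String × Int) :=
  let vals := rows.map (fun row => ((PySem.Dict.mk row).get? field).getD "null")
  groupRuns (PySem.List.sorted vals (fun x => x) false)

-- ===== PRECONDITION & SPEC =====
def Spec_count_py (rows : List (List (String × String))) (field : String) (out : List (String × Int)) : Prop := out = count_py_alt rows field
instance (rows : List (List (String × String))) (field : String) (out : List (String × Int)) : Decidable (Spec_count_py rows field out) := by unfold Spec_count_py; infer_instance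

-- ===== CLAIM (what is proved, stated in full; the proofs are below) =====
def Claim_equal_count_py : Prop := ∀ (rows : List (List (String × String))) (field : String), Dom_count_py rows field → Spec_count_py rows field (count_py rows field)

-- ===== LEMMAS AND PROOFS =====

-- in a Pairwise-(≤) list v :: rest, every element of dropWhile (== v) rest is > v
lemma lt_of_mem_drop (v : String) (rest : List String)
    (h : (v :: rest).Pairwise (· ≤ ·)) :
    ∀ x ∈ rest.dropWhile (fun x => x == v), v < x := by
  intro x hx
  have hsub : (rest.dropWhile (fun x => x == v)).Sublist rest := List.dropWhile_sublist _
  have hle : v ≤ x := (List.pairwise_cons.mp h).1 x (hsub.mem hx)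
  rcases eq_or_lt_of_le hle with heq | hlt
  · exfalso
    cases hd : rest.dropWhile (fun x => x == v) with
    | nil => simp [hd] at hx
    | cons h0 t0 =>
      have hh0 : ¬ (h0 == v) = true := by
        have := List.head?_dropWhile_not (fun x => x == v) rest
        rw [hd] at this; simpa using this
      have hh0ne : h0 ≠ v := by simpa using hh0
      have hvle : v ≤ h0 := (List.pairwise_cons.mp h).1 h0 (hsub.mem (by simp [hd]))
      have hp : (h0 :: t0).Pairwise (· ≤ ·) :=
        (((List.pairwise_cons.mp h).2).sublist (hd ▸ hsub))
      rw [hd] at hx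
      rcases List.mem_cons.mp hx with rfl | hmem
      · exact hh0ne heq.symm
      · have : h0 ≤ x := (List.pairwise_cons.mp hp).1 x hmem
        have : h0 ≤ v := heq ▸ this
        exact hh0ne (le_antisymm this hvle)
  · exact hlt

-- in a sorted list, the first run covers all occurrences of its head
lemma count_head (v : String) (rest : List String) (h : (v :: rest).Pairwise (· ≤ ·)) :
    (v :: rest).count v = 1 + (rest.takeWhile (fun x => x == v)).length := by
  have hsplit := List.takeWhile_append_dropWhile (p := fun x => x == v) (l := rest)
  have htake : ∀ x ∈ rest.takeWhile (fun x => x == v), x = v := by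
    intro x hx
    have := List.mem_takeWhile_imp hx
    simpa using this
  have hdrop0 : (rest.dropWhile (fun x => x == v)).count v = 0 := by
    rw [List.count_eq_zero]
    intro hmem
    exact absurd rfl (ne_of_gt (lt_of_mem_drop v rest h v hmem))
  have htcnt : (rest.takeWhile (fun x => x == v)).count v
      = (rest.takeWhile (fun x => x == v)).length := by
    apply List.count_eq_length.mpr
    intro x hx; simpa using (htake x hx).symm
  calc (v :: rest).count v = rest.count v + 1 := by rw [List.count_cons_self]
    _ = ((rest.takeWhile (fun x => x == v)) ++ rest.dropWhile (fun x => x == v)).count v + 1 := by rw [hsplit]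
    _ = 1 + (rest.takeWhile (fun x => x == v)).length := by
        rw [List.count_append, hdrop0, htcnt]; omega

-- dropping the first run does not change the count of any other key
lemma count_tail (v k : String) (rest : List String) (hk : k ≠ v) :
    (v :: rest).count k = (rest.dropWhile (fun x => x == v)).count k := by
  have hsplit := List.takeWhile_append_dropWhile (p := fun x => x == v) (l := rest)
  have : rest.count k = ((rest.takeWhile (fun x => x == v)) ++ rest.dropWhile (fun x => x == v)).count k := by rw [hsplit]
  have hne : (v :: rest).count k = rest.count k := by
    simp [Ne.symm hk]
  rw [hne, this, List.count_append, List.count_eq_zero.mpr, Nat.zero_add]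
  intro hmem
  have := List.mem_takeWhile_imp hmem
  simp at this; exact hk (this ▸ rfl)

-- characterisation of groupRuns on a sorted list: strictly increasing keys,
-- keys = the values occurring, each entry = the count of its key
lemma groupRuns_props (s : List String) (hs : s.Pairwise (· ≤ ·)) :
    (groupRuns s).Pairwise (fun a b => a.1 < b.1)
    ∧ (∀ k, k ∈ (groupRuns s).map (·.1) ↔ k ∈ s)
    ∧ (∀ p ∈ groupRuns s, p.2 = (s.count p.1 : Int)) := by
  induction s using groupRuns.induct with
  | case1 => simp [groupRuns]
  | case2 v rest ih =>
    set t := rest.dropWhile (fun x => x == v) with ht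
    have hsub : t.Sublist rest := List.dropWhile_sublist _
    have hst : t.Pairwise (· ≤ ·) := ((List.pairwise_cons.mp hs).2).sublist hsub
    obtain ⟨ih1, ih2, ih3⟩ := ih hst
    have hlt := lt_of_mem_drop v rest hs
    refine ⟨?_, ?_, ?_⟩
    · rw [groupRuns]
      refine List.pairwise_cons.mpr ⟨?_, ih1⟩
      intro p hp
      have : p.1 ∈ (groupRuns t).map (·.1) := List.mem_map_of_mem hp
      exact hlt p.1 ((ih2 p.1).mp this)
    · intro k
      rw [groupRuns, List.map_cons, List.mem_cons, List.mem_cons, ih2 k]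
      constructor
      · rintro (rfl | hk)
        · left; rfl
        · right; exact hsub.mem hk
      · rintro (rfl | hk2)
        · left; rfl
        · by_cases hkv : k = v
          · left; exact hkv
          · right
            have hsplit := List.takeWhile_append_dropWhile (p := fun x => x == v) (l := rest)
            rw [← hsplit] at hk2
            rcases List.mem_append.mp hk2 with hk | hk
            · exfalso
              have := List.mem_takeWhile_imp hk
              simp at this; exact hkv this
            · exact hk
    · intro p hp
      rw [groupRuns] at hp
      rcases List.mem_cons.mp hp with rfl | hp
      · simp only
        rw [count_head v rest hs]; push_cast; ring
      · have hk : p.1 ≠ v := ne_of_gt (hlt p.1 ((ih2 p.1).mp (List.mem_map_of_mem hp)))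
        rw [ih3 p hp, count_tail v p.1 rest hk]

-- sorting a counter's items by key = run-length grouping of the sorted values
lemma sorted_counter_items_eq_groupRuns (vals : List String) :
    PySem.List.sorted ((PySem.Set.ofList vals).map (fun k => (k, (vals.count k : Int))))
      (fun p => p.1) false
      = groupRuns (PySem.List.sorted vals (fun x => x) false) := by
  set s := PySem.List.sorted vals (fun x => x) false with hsdef
  have hsp : s.Pairwise (· ≤ ·) := by
    simpa using PySem.List.sorted_pairwise (xs := vals) (key := fun x => x)
  have hperm : s.Perm vals := PySem.List.sorted_perm _ _ _
  obtain ⟨h1, h2, h3⟩ := groupRuns_props s hsp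
  have hkeys : ((groupRuns s).map (·.1)).Perm (PySem.Set.ofList vals) := by
    rw [List.perm_ext_iff_of_nodup]
    · intro k
      rw [h2 k, PySem.Set.mem_ofList]
      exact hperm.mem_iff
    · exact (List.pairwise_map.mpr h1).nodup
    · exact PySem.Set.nodup_ofList vals
  have hself : groupRuns s = ((groupRuns s).map (·.1)).map (fun k => (k, (vals.count k : Int))) := by
    rw [List.map_map]
    conv_lhs => rw [← List.map_id (groupRuns s)]
    apply List.map_congr_left
    intro p hp
    have := h3 p hp
    have hc : s.count p.1 = vals.count p.1 := hperm.count_eq p.1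
    rw [hc] at this
    simp [← this]
  have hperm2 : (groupRuns s).Perm ((PySem.Set.ofList vals).map (fun k => (k, (vals.count k : Int)))) := by
    rw [hself]; exact hkeys.map _
  exact PySem.List.sorted_eq_of_perm_of_pairwise_lt _ _ _ hperm2 h1

-- ===== VERDICT (by name: the statement is the Claim_ definition above) =====
theorem count_py_spec : Claim_equal_count_py := by
  intro rows field _
  unfold Spec_count_py
  simp only [count_py, count_py_alt]
  set f : List (String × String) → String :=
    fun row => ((PySem.Dict.mk row).get? field).getD "null" with hf
  have hc : rows.foldl (fun d row => d.modify (f row) 0 (· + 1)) PySem.Dict.empty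
      = PySem.Dict.counter (rows.map f) := by
    rw [PySem.Dict.counter_eq_foldl, List.foldl_map]
  rw [hc, PySem.Dict.items_counter]
  exact sorted_counter_items_eq_groupRuns (rows.map f)
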